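-- pv_equiv track=rewrite | github.com/prawnydagrate/polynomial-sequences | qfind.py | find_q
-- ===== SOURCE A (Python) =====
-- def find_q(degree: int):
--     needed_terms = degree + 1
--
--     def vsub(lt: list[int], rt: list[int]) -> list[int]:
--         return list(diff for (lc, rc) in zip(lt, rt) if (diff := lc - rc) != 0)
--
--     # generate terms
--     terms = []
--     for n in range(1, needed_terms + 1):
--         term = []
--         for power in range(degree, -1, -1):
--             term.append(n**power)
--         terms.append(term)
--
--     # find differences
--     curr = terms
--     level = 0
--     while len(curr) != 1:
--         level += 1
--         newcurr = []
--         # windows of size 2 through current list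
--         for i in range(0, len(curr)-2+1):
--             rt, lt = curr[i:i+2]
--             newcurr.append(vsub(lt, rt))
--         curr = newcurr
--
--     q = curr[0][0]
--     return q
-- ===== SOURCE B (Python) =====
-- def find_q(degree: int):
--     # Closed form: the leading finite difference of n**degree is the
--     # alternating binomial sum  sum_k (-1)**(degree-k) * C(degree,k) * (k+1)**degree,
--     # accumulated in one pass with an incrementally maintained binomial coefficient.
--     total = 0
--     c = 1                                 # C(degree, k)
--     sign = -1 if degree % 2 else 1        # (-1)**(degree-k) for the current k
--     for k in range(degree + 1):
--         total += sign * c * (k + 1) ** degree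
--         sign = -sign
--         c = c * (degree - k) // (k + 1)
--     return total
-- ===== Notes on version B (the rewrite author's own statement) =====
-- stated objective: faster
-- what changed: Replaces A's repeated pairwise differencing of power-vector rows with a single O(degree) pass accumulating the alternating binomial sum sum_k (-1)^(degree-k)*C(degree,k)*(k+1)^degree, maintaining the binomial coefficient incrementally.
-- outside the precondition, e.g. on find_q(-1): A does not finish within the time limit, B returns 0
import Mathlib
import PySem

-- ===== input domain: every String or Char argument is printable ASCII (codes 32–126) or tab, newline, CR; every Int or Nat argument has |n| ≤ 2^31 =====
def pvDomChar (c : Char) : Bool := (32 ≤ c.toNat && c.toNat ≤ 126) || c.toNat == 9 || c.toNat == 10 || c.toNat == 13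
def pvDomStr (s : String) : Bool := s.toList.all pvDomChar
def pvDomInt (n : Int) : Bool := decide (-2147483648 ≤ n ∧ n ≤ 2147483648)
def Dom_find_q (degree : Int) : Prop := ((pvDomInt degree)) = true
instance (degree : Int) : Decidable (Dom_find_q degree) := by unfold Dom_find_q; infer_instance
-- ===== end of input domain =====

-- B replaces A's repeated pairwise differencing of power-vector rows by one O(degree)
-- pass accumulating the alternating binomial sum (objective: faster).


-- ===== PORT A =====
-- vsub(lt, rt): zip, keep the nonzero componentwise differences
def pvVsub (lt rt : List Int) : List Int :=
  (lt.zip rt).filterMap (fun p => if p.1 - p.2 ≠ 0 then some (p.1 - p.2) else none)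

-- one pass of the while-loop body: windows of size 2, rt,lt = curr[i:i+2]
def pvStepA (curr : List (List Int)) : List (List Int) :=
  (PySem.List.pyRange 0 ((curr.length : Int) - 2 + 1) 1).map (fun i =>
    let w := PySem.List.slice curr (some i) (some (i + 2))
    pvVsub (w.getD 1 []) (w.getD 0 []))

-- the while-loop; Python's loop runs exactly (len terms - 1) times when degree ≥ 0
-- (and diverges when terms = [], i.e. degree < 0 — excluded by Pre_), so fuel = terms.length suffices
def pvLoopA : Nat → List (List Int) → List (List Int)
  | 0, curr => curr
  | fuel + 1, curr => if curr.length ≠ 1 then pvLoopA fuel (pvStepA curr) else curr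

def find_q (degree : Int) : Int :=
  let terms : List (List Int) :=
    (PySem.List.pyRange 1 (degree + 1 + 1) 1).map (fun n =>
      (PySem.List.pyRange degree (-1) (-1)).map (fun power => n ^ power.toNat))
  let curr := pvLoopA terms.length terms
  -- q = curr[0][0]; both indices are in range whenever Python reaches this line
  (curr.getD 0 []).getD 0 0

-- ===== PORT B =====
def find_q_alt (degree : Int) : Int :=
  (((PySem.List.pyRange 0 (degree + 1) 1).foldl
    (fun (s : Int × Int × Int) k =>
      (s.1 + s.2.1 * s.2.2 * (k + 1) ^ degree.toNat,
       -s.2.1,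
       PySem.Int.floordiv (s.2.2 * (degree - k)) (k + 1)))
    (0, (if PySem.Int.mod degree 2 ≠ 0 then -1 else 1), 1))).1

-- ===== PRECONDITION & SPEC =====
-- Pre_ excludes degree < 0, on which Python's while-loop never terminates (A diverges).
def Pre_find_q (degree : Int) : Prop := 0 ≤ degree
instance (degree : Int) : Decidable (Pre_find_q degree) := by unfold Pre_find_q; infer_instance
def pvWitness_find_q : Int := 3

def Spec_find_q (degree : Int) (out : Int) : Prop := out = find_q_alt degree
instance (degree : Int) (out : Int) : Decidable (Spec_find_q degree out) := by unfold Spec_find_q; infer_instance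

-- ===== CLAIM (what is proved, stated in full; the proofs are below) =====
def Claim_equal_find_q : Prop := ∀ (degree : Int), Dom_find_q degree → Pre_find_q degree → Spec_find_q degree (find_q degree)

-- ===== LEMMAS AND PROOFS =====

-- forward difference operator on integer functions
def pvD (f : Int → Int) : Int → Int := fun x => f (x + 1) - f x

def pvPw (p : Nat) : Int → Int := fun x => x ^ p

-- ℓ-th difference of a finite sum is the sum of the ℓ-th differences
theorem pvD_iter_sum {α : Type} (s : Finset α) (F : α → Int → Int) (ℓ : Nat) :
    pvD^[ℓ] (fun x => ∑ a ∈ s, F a x) = fun x => ∑ a ∈ s, pvD^[ℓ] (F a) x := by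
  induction ℓ generalizing F with
  | zero => simp
  | succ m ih =>
    simp only [Function.iterate_succ_apply]
    have h1 : pvD (fun x => ∑ a ∈ s, F a x) = fun x => ∑ a ∈ s, pvD (F a) x := by
      funext x; simp [pvD, Finset.sum_sub_distrib]
    rw [h1, ih (fun a => pvD (F a))]

-- first difference of x^p is the binomial sum over lower powers
theorem pvD_pw (p : Nat) :
    pvD (pvPw p) = fun x => ∑ j ∈ Finset.range p, (p.choose j : Int) * pvPw j x := by
  funext x
  have hb := add_pow x (1 : Int) p
  simp only [one_pow, mul_one] at hb
  rw [pvD, pvPw]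
  simp only [pvPw, hb, Finset.sum_range_succ, Nat.choose_self]
  push_cast
  ring_nf

-- iterated difference commutes with a constant factor
theorem pvD_iter_smul (c : Int) (f : Int → Int) (ℓ : Nat) :
    pvD^[ℓ] (fun x => c * f x) = fun x => c * pvD^[ℓ] f x := by
  induction ℓ generalizing f with
  | zero => simp
  | succ m ih =>
    simp only [Function.iterate_succ_apply]
    have h1 : pvD (fun x => c * f x) = fun x => c * pvD f x := by
      funext x; simp [pvD, mul_sub]
    rw [h1, ih (pvD f)]

-- expand one difference, then iterate: the recursion the zero/positivity lemmas run on
theorem pvD_iter_succ_expand (p m : Nat) (x : Int) :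
    pvD^[m + 1] (pvPw p) x = ∑ j ∈ Finset.range p, (p.choose j : Int) * pvD^[m] (pvPw j) x := by
  rw [Function.iterate_succ_apply, pvD_pw, pvD_iter_sum (Finset.range p) (fun j x => (p.choose j : Int) * pvPw j x) m]
  exact Finset.sum_congr rfl (fun j _ => by rw [congrFun (pvD_iter_smul (p.choose j : Int) (pvPw j) m) x])

-- differences beyond the degree vanish
theorem pvD_iter_zero (p ℓ : Nat) (h : p < ℓ) (x : Int) : pvD^[ℓ] (pvPw p) x = 0 := by
  induction p using Nat.strong_induction_on generalizing ℓ x with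
  | _ p ih =>
    obtain ⟨m, rfl⟩ : ∃ m, ℓ = m + 1 := ⟨ℓ - 1, by omega⟩
    rw [pvD_iter_succ_expand]
    refine Finset.sum_eq_zero (fun j hj => ?_)
    rw [Finset.mem_range] at hj
    rw [ih j hj m (by omega) x, mul_zero]

-- differences up to the degree are positive at x ≥ 1
theorem pvD_iter_pos (p ℓ : Nat) (h : ℓ ≤ p) (x : Int) (hx : 1 ≤ x) :
    0 < pvD^[ℓ] (pvPw p) x := by
  induction p using Nat.strong_induction_on generalizing ℓ x with
  | _ p ih =>
    cases ℓ with
    | zero => simpa [pvPw] using pow_pos (show (0:Int) < x by omega) p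
    | succ m =>
      rw [pvD_iter_succ_expand]
      have hp : 0 < p := by omega
      refine Finset.sum_pos' (fun j hj => ?_) ⟨p - 1, Finset.mem_range.mpr (by omega), ?_⟩
      · rw [Finset.mem_range] at hj
        rcases lt_or_ge j m with hjm | hjm
        · rw [pvD_iter_zero j m hjm x, mul_zero]
        · exact le_of_lt (mul_pos (by exact_mod_cast Nat.choose_pos (by omega)) (ih j hj m hjm x hx))
      · exact mul_pos (by exact_mod_cast Nat.choose_pos (by omega)) (ih (p-1) (by omega) m (by omega) x hx)

-- explicit alternating-binomial formula for the iterated difference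
theorem pvD_iter_formula (f : Int → Int) (ℓ : Nat) (x : Int) :
    pvD^[ℓ] f x = ∑ j ∈ Finset.range (ℓ + 1), (-1) ^ (ℓ + j) * (ℓ.choose j : Int) * f (x + j) := by
  induction ℓ generalizing x with
  | zero => simp
  | succ m ih =>
    have hiter : pvD^[m + 1] f x = pvD^[m] f (x + 1) - pvD^[m] f x := by
      rw [Function.iterate_succ_apply']; rfl
    rw [hiter, ih (x + 1), ih x,
      Finset.sum_range_succ' (fun j => (-1:Int) ^ (m + 1 + j) * ((m+1).choose j : Int) * f (x + j)) (m + 1)]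
    have hsplit : ∀ j ∈ Finset.range (m + 1),
        (-1:Int) ^ (m + 1 + (j + 1)) * ((m+1).choose (j+1) : Int) * f (x + ((j:Int) + 1))
          = (-1) ^ (m + j) * (m.choose j : Int) * f ((x + 1) + j)
            + (-1) ^ (m + j) * (m.choose (j+1) : Int) * f (x + ((j:Int) + 1)) := by
      intro j _
      have hs : (-1:Int) ^ (m + 1 + (j + 1)) = (-1) ^ (m + j) := by
        have : m + 1 + (j + 1) = (m + j) + 2 := by omega
        rw [this, pow_add]; norm_num
      have harg : x + 1 + (j:Int) = x + ((j:Int) + 1) := by ring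
      rw [hs, Nat.choose_succ_succ, harg]
      push_cast
      ring
    have hc0 : ∀ j : Nat, x + ((j:Int) + 1) = x + ((j + 1 : Nat) : Int) := by intro j; push_cast; ring
    simp only [← hc0] at hsplit ⊢
    rw [Finset.sum_congr rfl hsplit, Finset.sum_add_distrib]
    have hS : ∑ j ∈ Finset.range (m + 1), (-1:Int) ^ (m + j) * (m.choose j : Int) * f (x + 1 + j)
        = pvD^[m] f (x + 1) := (ih (x + 1)).symm
    have hQ : ∑ j ∈ Finset.range (m + 1), (-1:Int) ^ (m + j) * (m.choose (j+1) : Int) * f (x + ((j:Int) + 1))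
        = ∑ j ∈ Finset.range m, (-1:Int) ^ (m + j) * (m.choose (j+1) : Int) * f (x + ((j:Int) + 1)) := by
      rw [Finset.sum_range_succ, Nat.choose_succ_self]; simp
    have hU : ∑ j ∈ Finset.range (m + 1), (-1:Int) ^ (m + j) * (m.choose j : Int) * f (x + j)
        = (∑ j ∈ Finset.range m, (-1:Int) ^ (m + (j+1)) * (m.choose (j+1) : Int) * f (x + ((j:Int) + 1))) + (-1) ^ (m + 0) * (m.choose 0 : Int) * f (x + (0:Nat)) := by
      rw [Finset.sum_range_succ' (fun j => (-1:Int) ^ (m + j) * (m.choose j : Int) * f (x + j)) m]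
      simp only [← hc0]
    rw [hQ, hU]
    have hsgn : ∀ j : Nat, (-1:Int) ^ (m + (j + 1)) = -((-1:Int) ^ (m + j)) := by
      intro j
      have : m + (j + 1) = (m + j) + 1 := by omega
      rw [this, pow_succ]; ring
    simp only [hsgn]
    have hT0 : (-1:Int) ^ (m + 1 + 0) = -((-1:Int) ^ (m + 0)) := by rw [pow_succ']; ring_nf
    simp only [hT0]
    push_cast
    ring_nf
    simp only [Finset.sum_neg_distrib, Nat.choose_zero_right, Nat.cast_one]
    ring

-- the ideal rows of A's computation
def pvRow (d ℓ : Nat) (n : Int) : List Int :=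
  (List.range (d + 1 - ℓ)).map (fun t => pvD^[ℓ] (pvPw (d - t)) n)

def pvRows (d ℓ : Nat) : List (List Int) :=
  (List.range (d + 1 - ℓ)).map (fun i : Nat => pvRow d ℓ ((i : Int) + 1))

theorem pv_terms_eq (d : Nat) :
    (PySem.List.pyRange 1 ((d : Int) + 1 + 1) 1).map (fun n =>
      (PySem.List.pyRange (d : Int) (-1) (-1)).map (fun power => n ^ power.toNat)) = pvRows d 0 := by
  rw [PySem.List.pyRange_one]
  have h1 : ((d:Int) + 1 + 1 - 1).toNat = d + 1 := by omega
  rw [h1, List.map_map]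
  unfold pvRows
  simp only [Nat.sub_zero]
  refine List.map_congr_left (fun k hk => ?_)
  rw [List.mem_range] at hk
  rw [PySem.List.pyRange_neg_one]
  have h2 : ((d:Int) - (-1)).toNat = d + 1 := by omega
  rw [h2]
  simp only [Function.comp_apply, List.map_map]
  unfold pvRow
  simp only [Nat.sub_zero]
  refine List.map_congr_left (fun t ht => ?_)
  rw [List.mem_range] at ht
  have h3 : ((d:Int) - (t:Int)).toNat = d - t := by omega
  simp only [Function.comp_apply, Function.iterate_zero, id_eq, pvPw, h3]
  rw [show 1 + (k:Int) = (k:Int) + 1 by ring]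

theorem pv_filterMap_ne_zero (l : List Nat) (e : Nat → Int) (h : ∀ t ∈ l, e t ≠ 0) :
    l.filterMap (fun t => if e t ≠ 0 then some (e t) else none) = l.map e := by
  induction l with
  | nil => simp
  | cons a l ih =>
    simp only [List.filterMap_cons, List.map_cons]
    rw [if_pos (h a (List.mem_cons_self)), ih (fun t ht => h t (List.mem_cons_of_mem a ht))]

theorem pv_vsub_row (d ℓ : Nat) (h : ℓ < d) (n : Int) (hn : 1 ≤ n) :
    pvVsub (pvRow d ℓ (n + 1)) (pvRow d ℓ n) = pvRow d (ℓ + 1) n := by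
  unfold pvVsub pvRow
  rw [List.zip_map', List.filterMap_map]
  have he : ∀ t : Nat, pvD^[ℓ] (pvPw (d - t)) (n + 1) - pvD^[ℓ] (pvPw (d - t)) n
      = pvD^[ℓ + 1] (pvPw (d - t)) n := by
    intro t; rw [Function.iterate_succ_apply']; rfl
  have hcomp : ((fun p : Int × Int => if p.1 - p.2 ≠ 0 then some (p.1 - p.2) else none) ∘
      (fun t : Nat => (pvD^[ℓ] (pvPw (d - t)) (n + 1), pvD^[ℓ] (pvPw (d - t)) n)))
      = fun t : Nat => if pvD^[ℓ + 1] (pvPw (d - t)) n ≠ 0 then some (pvD^[ℓ + 1] (pvPw (d - t)) n) else none := by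
    funext t; simp only [Function.comp_apply, he t]
  rw [hcomp]
  have hr1 : d + 1 - ℓ = (d - ℓ) + 1 := by omega
  have hr2 : d + 1 - (ℓ + 1) = d - ℓ := by omega
  rw [hr1, hr2, List.range_succ, List.filterMap_append,
    pv_filterMap_ne_zero _ _ (fun t ht => ?_)]
  · have hz : pvD^[ℓ + 1] (pvPw (d - (d - ℓ))) n = 0 :=
      pvD_iter_zero (d - (d - ℓ)) (ℓ + 1) (by omega) n
    simp only [Function.iterate_succ_apply] at hz
    simp [hz]
  · rw [List.mem_range] at ht
    exact ne_of_gt (pvD_iter_pos (d - t) (ℓ + 1) (by omega) n hn)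

theorem pv_take_two_drop {α : Type} (m i : Nat) (f : Nat → α) (h : i + 2 ≤ m) :
    ((((List.range m).map f).drop i).take 2) = [f i, f (i + 1)] := by
  apply List.ext_getElem
  · simp; omega
  · intro k hk1 hk2
    simp only [List.length_take, List.length_drop, List.length_map, List.length_range] at hk1
    have hk : k < 2 := by omega
    simp only [List.getElem_take, List.getElem_drop, List.getElem_map, List.getElem_range]
    interval_cases k
    · simp
    · simp

theorem pv_step_rows (d ℓ : Nat) (h : ℓ < d) : pvStepA (pvRows d ℓ) = pvRows d (ℓ + 1) := by
  unfold pvStepA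
  have hlen : (pvRows d ℓ).length = d + 1 - ℓ := by simp [pvRows]
  rw [hlen, show ((d + 1 - ℓ : Nat) : Int) - 2 + 1 = ((d - ℓ : Nat) : Int) from by omega,
    PySem.List.pyRange_one, show ((d - ℓ : Nat) : Int) - 0 = ((d - ℓ : Nat) : Int) from by ring,
    Int.toNat_natCast, List.map_map]
  conv_rhs => rw [pvRows, show d + 1 - (ℓ + 1) = d - ℓ from by omega]
  refine List.map_congr_left (fun i hi => ?_)
  rw [List.mem_range] at hi
  simp only [Function.comp_apply, zero_add]
  have h2 : ((i : Int) + 2) = ((i : Int) + ((2 : Nat) : Int)) := by norm_num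
  rw [h2, PySem.List.slice_natCast_add]
  rw [show (pvRows d ℓ) = (List.range (d + 1 - ℓ)).map (fun j : Nat => pvRow d ℓ ((j : Int) + 1)) from rfl]
  rw [pv_take_two_drop (d + 1 - ℓ) i _ (by omega)]
  simp only [List.getD_cons_succ, List.getD_cons_zero]
  have := pv_vsub_row d ℓ h ((i : Int) + 1) (by omega)
  rw [show ((i + 1 : Nat) : Int) + 1 = ((i : Int) + 1) + 1 from by push_cast; ring]
  exact this

theorem pv_loop_rows (d m ℓ : Nat) (h : ℓ + m = d) :
    pvLoopA (m + 1) (pvRows d ℓ) = pvRows d d := by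
  induction m generalizing ℓ with
  | zero =>
    have : ℓ = d := by omega
    subst this
    have hlen : (pvRows ℓ ℓ).length = 1 := by simp [pvRows]
    simp [pvLoopA, hlen]
  | succ k ih =>
    have hℓ : ℓ < d := by omega
    have hlen : (pvRows d ℓ).length = d + 1 - ℓ := by simp [pvRows]
    have hne : (pvRows d ℓ).length ≠ 1 := by omega
    show pvLoopA (k + 1 + 1) (pvRows d ℓ) = pvRows d d
    rw [pvLoopA, if_pos hne, pv_step_rows d ℓ hℓ]
    exact ih (ℓ + 1) (by omega)

-- A computes the leading d-th difference
theorem pv_find_q_eq (d : Nat) : find_q (d : Int) = pvD^[d] (pvPw d) 1 := by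
  unfold find_q
  rw [pv_terms_eq d]
  show ((pvLoopA (pvRows d 0).length (pvRows d 0)).getD 0 []).getD 0 0 = pvD^[d] (pvPw d) 1
  have hlen : (pvRows d 0).length = d + 1 := by simp [pvRows]
  rw [hlen, pv_loop_rows d d 0 (by omega)]
  have h1 : pvRows d d = [pvRow d d 1] := by
    unfold pvRows
    rw [show d + 1 - d = 1 from by omega]
    simp
  have h2 : pvRow d d 1 = [pvD^[d] (pvPw d) 1] := by
    unfold pvRow
    rw [show d + 1 - d = 1 from by omega]
    simp
  rw [h1, h2]
  rfl

-- the initial sign is (-1)^degree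
theorem pv_sign_init (d : Nat) :
    (if PySem.Int.mod (d : Int) 2 ≠ 0 then (-1 : Int) else 1) = (-1 : Int) ^ d := by
  have h2 : PySem.Int.mod (d : Int) 2 = ((d % 2 : Nat) : Int) := by
    exact_mod_cast PySem.Int.mod_natCast d 2
  rw [h2]
  rcases Nat.even_or_odd d with he | ho
  · rw [he.neg_one_pow, if_neg]
    simp [Nat.even_iff.mp he]
  · rw [ho.neg_one_pow, if_pos]
    simp [Nat.odd_iff.mp ho]

-- the incremental binomial update is exact
theorem pv_choose_step (d m : Nat) (hm : m ≤ d) :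
    PySem.Int.floordiv ((d.choose m : Int) * ((d : Int) - (m : Int))) ((m : Int) + 1)
      = (d.choose (m + 1) : Int) := by
  rw [show ((d : Int) - (m : Int)) = ((d - m : Nat) : Int) from by omega,
    show ((m : Int) + 1) = ((m + 1 : Nat) : Int) from by push_cast; ring,
    show ((d.choose m : Int) * ((d - m : Nat) : Int)) = ((d.choose m * (d - m) : Nat) : Int) from by push_cast; ring,
    PySem.Int.floordiv_natCast]
  rw [← Nat.choose_succ_right_eq, Nat.mul_div_cancel _ (by omega)]

-- loop invariant for B's fold
theorem pv_alt_fold (d m : Nat) (hm : m ≤ d + 1) :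
    ((List.range m).map (fun k : Nat => (k : Int))).foldl
      (fun (s : Int × Int × Int) k =>
        (s.1 + s.2.1 * s.2.2 * (k + 1) ^ d,
         -s.2.1,
         PySem.Int.floordiv (s.2.2 * ((d : Int) - k)) (k + 1)))
      (0, (if PySem.Int.mod (d : Int) 2 ≠ 0 then -1 else 1), 1)
    = (∑ j ∈ Finset.range m, (-1) ^ (d + j) * (d.choose j : Int) * (1 + j) ^ d,
       (-1) ^ (d + m), (d.choose m : Int)) := by
  induction m with
  | zero =>
    simp only [List.range_zero, List.map_nil, List.foldl_nil, Finset.range_zero,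
      Finset.sum_empty, Nat.add_zero, Nat.choose_zero_right, Nat.cast_one]
    rw [pv_sign_init d]
  | succ k ih =>
    have hk : k ≤ d := by omega
    rw [List.range_succ, List.map_append, List.foldl_append, ih (by omega)]
    simp only [List.map_cons, List.map_nil, List.foldl_cons, List.foldl_nil]
    refine Prod.ext ?_ (Prod.ext ?_ ?_)
    · simp only [Finset.sum_range_succ]
      ring
    · show -((-1 : Int) ^ (d + k)) = (-1 : Int) ^ (d + (k + 1))
      rw [show d + (k + 1) = (d + k) + 1 from by omega, pow_succ]
      ring
    · show PySem.Int.floordiv ((d.choose k : Int) * ((d : Int) - (k : Int))) ((k : Int) + 1)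
        = (d.choose (k + 1) : Int)
      exact pv_choose_step d k hk

-- B computes the alternating binomial sum
theorem pv_find_q_alt_eq (d : Nat) :
    find_q_alt (d : Int) = ∑ j ∈ Finset.range (d + 1), (-1) ^ (d + j) * (d.choose j : Int) * (1 + j) ^ d := by
  unfold find_q_alt
  rw [show ((d : Int) + 1) = ((d + 1 : Nat) : Int) from by push_cast; ring,
    PySem.List.pyRange_one, show ((d + 1 : Nat) : Int) - 0 = ((d + 1 : Nat) : Int) from by ring,
    Int.toNat_natCast]
  simp only [zero_add, Int.toNat_natCast]
  rw [pv_alt_fold d (d + 1) le_rfl]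

-- ===== VERDICT (by name: the statement is the Claim_ definition above) =====
theorem find_q_spec : Claim_equal_find_q := by
  intro degree _ hpre
  unfold Spec_find_q
  obtain ⟨d, rfl⟩ : ∃ d : Nat, degree = (d : Int) := ⟨degree.toNat, (Int.toNat_of_nonneg hpre).symm⟩
  rw [pv_find_q_eq, pv_find_q_alt_eq, pvD_iter_formula]
  exact Finset.sum_congr rfl (fun j _ => by simp [pvPw])
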